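-- pv_equiv track=rewrite | github.com/Mrsterius/python_training | lecture_18/rat_problem.py | maze_li
-- ===== SOURCE A (Python) =====
-- def maze_li(board, c_r, c_c, t_r, t_c, rows, cols, path=""):
--
--     if (c_r == t_r) and (c_c == t_c):
--         return [path]
--
--     if (c_r not in range(0, rows)) or (c_c not in range(0, cols)):
--         return []
--
--     if board[c_r][c_c]:
--         return []
--
--     acc = []
--     board[c_r][c_c] = True
--     acc.extend(maze_li(board, c_r - 1, c_c, t_r, t_c, rows, cols, path+"U"))
--     acc.extend(maze_li(board, c_r + 1, c_c, t_r, t_c, rows, cols, path+"D"))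
--     acc.extend(maze_li(board, c_r, c_c - 1, t_r, t_c, rows, cols, path+"L"))
--     acc.extend(maze_li(board, c_r, c_c + 1, t_r, t_c, rows, cols, path+"R"))
--     board[c_r][c_c] = False
--
--     return acc
-- ===== SOURCE B (Python) =====
-- def maze_li(board, c_r, c_c, t_r, t_c, rows, cols, path=""):
--     results = []
--     stack = [(c_r, c_c, path, frozenset())]
--     while stack:
--         r, c, p, visited = stack.pop()
--         if r == t_r and c == t_c:
--             results.append(p)
--             continue
--         if not (0 <= r < rows) or not (0 <= c < cols):
--             continue
--         if board[r][c] or (r, c) in visited: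
--             continue
--         nv = visited | {(r, c)}
--         stack.append((r, c + 1, p + "R", nv))
--         stack.append((r, c - 1, p + "L", nv))
--         stack.append((r + 1, c, p + "D", nv))
--         stack.append((r - 1, c, p + "U", nv))
--     return results
-- ===== Notes on version B (the rewrite author's own statement) =====
-- stated objective: alternative
-- what changed: Recursive backtracking that temporarily marks cells on the shared board is replaced by an iterative depth-first search over an explicit stack of (row, col, path, visited-frozenset) frames, pushed in reverse so the pop order reproduces A's U,D,L,R pre-order; B never mutates the board.
-- outside the precondition, e.g. on maze_li([[True]], 0, 0, 1, 0, 2, 1, ''): A returns [], B returns []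
import Mathlib
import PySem

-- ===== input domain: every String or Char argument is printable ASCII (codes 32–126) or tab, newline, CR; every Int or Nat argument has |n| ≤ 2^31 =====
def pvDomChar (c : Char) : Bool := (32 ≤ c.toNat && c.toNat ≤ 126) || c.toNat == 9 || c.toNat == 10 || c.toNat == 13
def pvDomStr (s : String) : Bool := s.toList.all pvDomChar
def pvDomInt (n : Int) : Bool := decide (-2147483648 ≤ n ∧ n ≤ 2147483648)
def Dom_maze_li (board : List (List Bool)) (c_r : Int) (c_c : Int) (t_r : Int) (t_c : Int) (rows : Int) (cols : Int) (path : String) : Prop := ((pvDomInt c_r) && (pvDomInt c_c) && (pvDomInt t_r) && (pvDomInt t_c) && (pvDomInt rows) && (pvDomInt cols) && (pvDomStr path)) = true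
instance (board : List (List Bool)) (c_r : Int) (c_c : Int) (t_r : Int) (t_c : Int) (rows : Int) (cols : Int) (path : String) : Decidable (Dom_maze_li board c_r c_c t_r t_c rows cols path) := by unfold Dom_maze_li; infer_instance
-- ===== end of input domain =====

-- ===== PORT A =====
-- ===== PORT A =====
-- Port of A, the recursive backtracker. A temporarily marks board[c_r][c_c] = True and
-- restores it before returning (board is net-unmutated), so the functional port passes the
-- marked board to the recursive calls; the equivalence proved here is about the return value.
-- board[r][c] (only evaluated after the range checks, so indices are nonnegative):
def cellGet (b : List (List Bool)) (r c : Int) : Bool :=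
  (b.getD r.toNat []).getD c.toNat true

-- board[r][c] = True:
def setCell (b : List (List Bool)) (r c : Int) : List (List Bool) :=
  b.set r.toNat ((b.getD r.toNat []).set c.toNat true)

-- termination measure for the port of A: number of free (False) cells on the board
def nFree (b : List (List Bool)) : Nat := (b.map (fun row => row.count false)).sum

theorem count_false_set_true (row : List Bool) (c : Nat) (h : row.getD c true = false) :
    (row.set c true).count false < row.count false := by
  induction row generalizing c with
  | nil => simp at h
  | cons a tl ih =>
    cases c with
    | zero =>
      simp only [List.getD_cons_zero] at h
      subst h
      simp
    | succ n =>
      simp only [List.getD_cons_succ] at h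
      have := ih n h
      simp only [List.set_cons_succ, List.count_cons]
      omega

theorem nFree_set_row (b : List (List Bool)) (r : Nat) (row' : List Bool)
    (h : r < b.length) (hlt : row'.count false < (b.getD r []).count false) :
    nFree (b.set r row') < nFree b := by
  induction b generalizing r with
  | nil => simp at h
  | cons hd tl ih =>
    cases r with
    | zero =>
      simp only [List.getD_cons_zero] at hlt
      simp only [nFree, List.set_cons_zero, List.map, List.sum_cons]
      omega
    | succ n =>
      simp only [List.getD_cons_succ] at hlt
      have := ih n (by simpa using h) hlt
      simp only [nFree, List.set_cons_succ, List.map, List.sum_cons] at *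
      omega

theorem getD_true_false_lt (l : List Bool) (n : Nat) (h : l.getD n true = false) :
    n < l.length := by
  by_contra hg
  rw [List.getD_eq_getElem?_getD, List.getElem?_eq_none (by omega)] at h
  simp at h

theorem getD_nil_of_ge {α : Type} (l : List (List α)) (n : Nat) (hg : l.length ≤ n) :
    l.getD n [] = [] := by
  rw [List.getD_eq_getElem?_getD, List.getElem?_eq_none hg]
  rfl

theorem nFree_setCell_lt (b : List (List Bool)) (r c : Int)
    (h : cellGet b r c = false) : nFree (setCell b r c) < nFree b := by
  unfold cellGet at h
  have hc : c.toNat < (b.getD r.toNat []).length := getD_true_false_lt _ _ h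
  have hr : r.toNat < b.length := by
    by_contra hge
    rw [getD_nil_of_ge b r.toNat (by omega)] at hc
    simp at hc
  exact nFree_set_row b r.toNat _ hr (count_false_set_true _ _ h)

def maze_li (board : List (List Bool)) (c_r : Int) (c_c : Int) (t_r : Int) (t_c : Int) (rows : Int) (cols : Int) (path : String) : List String :=
  if c_r = t_r ∧ c_c = t_c then [path]
  else if ¬(0 ≤ c_r ∧ c_r < rows) ∨ ¬(0 ≤ c_c ∧ c_c < cols) then []
  else if hcell : cellGet board c_r c_c = true then []
  else
    let b' := setCell board c_r c_c
    maze_li b' (c_r - 1) c_c t_r t_c rows cols (path ++ "U") ++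
    maze_li b' (c_r + 1) c_c t_r t_c rows cols (path ++ "D") ++
    maze_li b' c_r (c_c - 1) t_r t_c rows cols (path ++ "L") ++
    maze_li b' c_r (c_c + 1) t_r t_c rows cols (path ++ "R")
termination_by nFree board
decreasing_by
  all_goals exact nFree_setCell_lt board c_r c_c (by simpa using hcell)

-- ===== PORT B =====
-- Port of B: iterative DFS over an explicit stack of (r, c, path, visited) frames
-- (head of the list = top of the stack, i.e. the end of the Python list).

-- free (in-board, False) cells of the board; used only for B's termination measure
def freeCells (b : List (List Bool)) : List (Int × Int) :=
  (List.range b.length).flatMap (fun i =>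
    ((List.range (b.getD i []).length).filter
      (fun j => (b.getD i []).getD j true = false)).map (fun j => (Int.ofNat i, Int.ofNat j)))

def potB (b : List (List Bool)) (v : List (Int × Int)) : Nat :=
  ((freeCells b).filter (fun x => decide (x ∉ v))).length

theorem filter_length_le {α : Type} (l : List α) (p q : α → Bool)
    (hpq : ∀ x ∈ l, q x = true → p x = true) :
    (l.filter q).length ≤ (l.filter p).length := by
  induction l with
  | nil => simp
  | cons a tl ih =>
    have ih' := ih (fun y hy => hpq y (List.mem_cons_of_mem a hy))
    by_cases hqa : q a = true
    · rw [List.filter_cons_of_pos hqa,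
        List.filter_cons_of_pos (hpq a List.mem_cons_self hqa)]
      simpa using ih'
    · rw [List.filter_cons_of_neg (by simp [hqa])]
      by_cases hpa : p a = true
      · rw [List.filter_cons_of_pos hpa]
        simp only [List.length_cons]
        omega
      · rw [List.filter_cons_of_neg (by simp [hpa])]
        exact ih'

theorem filter_length_lt {α : Type} (l : List α) (p q : α → Bool)
    (hpq : ∀ x ∈ l, q x = true → p x = true) (x : α) (hx : x ∈ l)
    (hp : p x = true) (hq : q x = false) :
    (l.filter q).length < (l.filter p).length := by
  induction l with
  | nil => simp at hx
  | cons a tl ih =>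
    rw [List.mem_cons] at hx
    rcases hx with rfl | hx
    · rw [List.filter_cons_of_pos hp, List.filter_cons_of_neg (by simp [hq])]
      have := filter_length_le tl p q (fun y hy => hpq y (List.mem_cons_of_mem x hy))
      simp only [List.length_cons]
      omega
    · have := ih (fun y hy => hpq y (List.mem_cons_of_mem a hy)) hx
      by_cases ha : p a = true
      · rw [List.filter_cons_of_pos ha]
        by_cases hqa : q a = true
        · rw [List.filter_cons_of_pos hqa]
          simpa using this
        · rw [List.filter_cons_of_neg (by simp [hqa])]
          simp only [List.length_cons]
          omega
      · have hpa : p a = false := by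
          cases h2 : p a
          · rfl
          · exact absurd h2 ha
        have hqa : q a = false := by
          cases h2 : q a
          · rfl
          · exact absurd (hpq a List.mem_cons_self h2) ha
        rw [List.filter_cons_of_neg (by simp [hqa]), List.filter_cons_of_neg (by simp [hpa])]
        exact this

theorem mem_freeCells (b : List (List Bool)) (r c : Int)
    (hr : 0 ≤ r) (hc : 0 ≤ c) (h : cellGet b r c = false) :
    (r, c) ∈ freeCells b := by
  unfold cellGet at h
  have hcl : c.toNat < (b.getD r.toNat []).length := getD_true_false_lt _ _ h
  have hrl : r.toNat < b.length := by
    by_contra hge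
    rw [getD_nil_of_ge b r.toNat (by omega)] at hcl
    simp at hcl
  unfold freeCells
  apply List.mem_flatMap.mpr
  refine ⟨r.toNat, List.mem_range.mpr hrl, ?_⟩
  apply List.mem_map.mpr
  refine ⟨c.toNat, List.mem_filter.mpr ⟨List.mem_range.mpr hcl, by simpa using h⟩, ?_⟩
  show ((r.toNat : Int), (c.toNat : Int)) = (r, c)
  rw [Int.toNat_of_nonneg hr, Int.toNat_of_nonneg hc]

theorem potB_add_lt (b : List (List Bool)) (v : PySem.Set (Int × Int)) (r c : Int)
    (hr : 0 ≤ r) (hc : 0 ≤ c) (hcell : cellGet b r c = false)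
    (hmem : (r, c) ∉ v) :
    potB b (PySem.Set.add v (r, c)) < potB b v := by
  apply filter_length_lt _ _ _ ?_ (r, c) (mem_freeCells b r c hr hc hcell)
    (by simpa using hmem) (by simp [PySem.Set.mem_add])
  intro x _ hx
  simp only [decide_eq_true_eq] at hx ⊢
  intro hxv
  exact hx (by rw [PySem.Set.mem_add]; left; exact hxv)

theorem pow5_pos (k : Nat) : 0 < 5 ^ k := Nat.pow_pos (by norm_num)

theorem stepB_lt (k' k m : Nat) (h : k' < k) :
    5 ^ k' + (5 ^ k' + (5 ^ k' + (5 ^ k' + m))) < 5 ^ k + m := by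
  have h1 : 5 ^ (k' + 1) ≤ 5 ^ k := Nat.pow_le_pow_right (by norm_num) h
  have h2 : 5 ^ (k' + 1) = 5 * 5 ^ k' := by ring
  have h3 : 0 < 5 ^ k' := pow5_pos k'
  omega

def mazeGo (board : List (List Bool)) (t_r t_c rows cols : Int)
    (stack : List (Int × Int × String × PySem.Set (Int × Int)))
    (results : List String) : List String :=
  match stack with
  | [] => results
  | (r, c, p, visited) :: rest =>
    if r = t_r ∧ c = t_c then
      mazeGo board t_r t_c rows cols rest (results ++ [p])
    else if hrng : ¬(0 ≤ r ∧ r < rows) ∨ ¬(0 ≤ c ∧ c < cols) then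
      mazeGo board t_r t_c rows cols rest results
    else if hblk : (cellGet board r c || PySem.Set.contains visited (r, c)) = true then
      mazeGo board t_r t_c rows cols rest results
    else
      let nv := PySem.Set.add visited (r, c)
      mazeGo board t_r t_c rows cols
        ((r - 1, c, p ++ "U", nv) :: (r + 1, c, p ++ "D", nv) ::
         (r, c - 1, p ++ "L", nv) :: (r, c + 1, p ++ "R", nv) :: rest) results
termination_by (stack.map (fun f => 5 ^ potB board f.2.2.2)).sum
decreasing_by
  · simp only [List.map_cons, List.sum_cons]
    exact Nat.lt_add_of_pos_left (pow5_pos _)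
  · simp only [List.map_cons, List.sum_cons]
    exact Nat.lt_add_of_pos_left (pow5_pos _)
  · simp only [List.map_cons, List.sum_cons]
    exact Nat.lt_add_of_pos_left (pow5_pos _)
  · simp only [List.map_cons, List.sum_cons]
    have hb : (0 ≤ r ∧ r < rows) ∧ (0 ≤ c ∧ c < cols) := by
      rw [not_or, not_not, not_not] at hrng
      exact hrng
    have hor : ¬(cellGet board r c = true ∨ PySem.Set.contains visited (r, c) = true) := by
      simpa using hblk
    have hcell : cellGet board r c = false := by
      cases hcg : cellGet board r c
      · rfl
      · exact absurd (Or.inl hcg) hor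
    have hmem : (r, c) ∉ visited := fun hm => hor (Or.inr (by simpa using hm))
    exact stepB_lt _ _ _
      (potB_add_lt board visited r c hb.1.1 hb.2.1 hcell hmem)

def maze_li_alt (board : List (List Bool)) (c_r : Int) (c_c : Int) (t_r : Int) (t_c : Int) (rows : Int) (cols : Int) (path : String) : List String :=
  mazeGo board t_r t_c rows cols [(c_r, c_c, path, PySem.Set.empty)] []

-- ===== PRECONDITION & SPEC =====
-- Pre_ excludes inputs whose declared rows × cols search area extends beyond the actual board
-- (unless the start already equals the target or is out of the declared range): there A's
-- board[r][c] can hit a missing cell and raise IndexError; on the few excluded inputs where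
-- the search is walled off first and A still returns, B returns the same value anyway.
def Pre_maze_li (board : List (List Bool)) (c_r : Int) (c_c : Int) (t_r : Int) (t_c : Int) (rows : Int) (cols : Int) (path : String) : Prop :=
  (c_r = t_r ∧ c_c = t_c) ∨ ¬(0 ≤ c_r ∧ c_r < rows ∧ 0 ≤ c_c ∧ c_c < cols) ∨
  (rows ≤ (board.length : Int) ∧ ∀ row ∈ board.take rows.toNat, cols ≤ (row.length : Int))
instance (board : List (List Bool)) (c_r : Int) (c_c : Int) (t_r : Int) (t_c : Int) (rows : Int) (cols : Int) (path : String) : Decidable (Pre_maze_li board c_r c_c t_r t_c rows cols path) := by unfold Pre_maze_li; infer_instance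

def pvWitness_maze_li : List (List Bool) × Int × Int × Int × Int × Int × Int × String :=
  ([[false, false], [false, false]], 0, 0, 1, 1, 2, 2, "")

def Spec_maze_li (board : List (List Bool)) (c_r : Int) (c_c : Int) (t_r : Int) (t_c : Int) (rows : Int) (cols : Int) (path : String) (out : List String) : Prop := out = maze_li_alt board c_r c_c t_r t_c rows cols path
instance (board : List (List Bool)) (c_r : Int) (c_c : Int) (t_r : Int) (t_c : Int) (rows : Int) (cols : Int) (path : String) (out : List String) : Decidable (Spec_maze_li board c_r c_c t_r t_c rows cols path out) := by unfold Spec_maze_li; infer_instance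

-- ===== CLAIM (what is proved, stated in full; the proofs are below) =====
def Claim_equal_maze_li : Prop := ∀ (board : List (List Bool)) (c_r : Int) (c_c : Int) (t_r : Int) (t_c : Int) (rows : Int) (cols : Int) (path : String), Dom_maze_li board c_r c_c t_r t_c rows cols path → Pre_maze_li board c_r c_c t_r t_c rows cols path → Spec_maze_li board c_r c_c t_r t_c rows cols path (maze_li board c_r c_c t_r t_c rows cols path)

-- ===== LEMMAS AND PROOFS =====

-- the board with every cell of v marked True: the state A's recursion passes down
def markB (b : List (List Bool)) (v : List (Int × Int)) : List (List Bool) :=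
  v.foldl (fun acc x => setCell acc x.1 x.2) b

theorem markB_append (b : List (List Bool)) (v : List (Int × Int)) (x : Int × Int) :
    markB b (v ++ [x]) = setCell (markB b v) x.1 x.2 := by
  unfold markB
  rw [List.foldl_append]
  rfl

theorem cellGet_setCell (b : List (List Bool)) (a b2 r c : Int) :
    cellGet (setCell b a b2) r c
      = (cellGet b r c || (decide (r.toNat = a.toNat) && decide (c.toNat = b2.toNat))) := by
  unfold cellGet setCell
  by_cases hra : r.toNat = a.toNat
  · by_cases hin : a.toNat < b.length
    · have hrow : (b.set a.toNat ((b.getD a.toNat []).set b2.toNat true)).getD r.toNat []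
          = (b.getD a.toNat []).set b2.toNat true := by
        rw [hra, List.getD_eq_getElem?_getD, List.getElem?_set_self hin]
        rfl
      rw [hrow, hra]
      by_cases hcb : c.toNat = b2.toNat
      · by_cases hcin : b2.toNat < (b.getD a.toNat []).length
        · rw [hcb, List.getD_eq_getElem?_getD, List.getElem?_set_self hcin]
          simp
        · rw [List.set_eq_of_length_le (by omega)]
          have hdef : (b.getD a.toNat []).getD c.toNat true = true := by
            rw [List.getD_eq_getElem?_getD, List.getElem?_eq_none (by omega)]
            rfl
          rw [hdef]
          simp
      · rw [List.getD_eq_getElem?_getD, List.getElem?_set_ne (fun h => hcb h.symm),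
          ← List.getD_eq_getElem?_getD]
        simp [hcb]
    · rw [List.set_eq_of_length_le (by omega)]
      have hnil : b.getD r.toNat [] = [] := getD_nil_of_ge b r.toNat (by omega)
      rw [hnil]
      simp
  · have hrow : (b.set a.toNat ((b.getD a.toNat []).set b2.toNat true)).getD r.toNat []
        = b.getD r.toNat [] := by
      rw [List.getD_eq_getElem?_getD, List.getElem?_set_ne (fun h => hra h.symm),
        ← List.getD_eq_getElem?_getD]
    rw [hrow]
    simp [hra]

-- equality of toNat for nonnegative Ints
theorem pvToNatInj {m n : Int} (hm : 0 ≤ m) (hn : 0 ≤ n) :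
    m.toNat = n.toNat ↔ m = n := by
  omega

theorem cellGet_markB (v : List (Int × Int)) (b : List (List Bool)) (r c : Int)
    (hr : 0 ≤ r) (hc : 0 ≤ c) (hv : ∀ x ∈ v, 0 ≤ x.1 ∧ 0 ≤ x.2) :
    cellGet (markB b v) r c = (cellGet b r c || decide ((r, c) ∈ v)) := by
  induction v generalizing b with
  | nil => simp [markB]
  | cons x tl ih =>
    have hx := hv x List.mem_cons_self
    have htl : ∀ y ∈ tl, 0 ≤ y.1 ∧ 0 ≤ y.2 := fun y hy => hv y (List.mem_cons_of_mem x hy)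
    have hstep : markB b (x :: tl) = markB (setCell b x.1 x.2) tl := by
      unfold markB
      rw [List.foldl_cons]
    rw [hstep, ih _ htl, cellGet_setCell]
    have hdec : (decide (r.toNat = x.1.toNat) && decide (c.toNat = x.2.toNat))
        = decide ((r, c) = x) := by
      rcases x with ⟨x1, x2⟩
      have h1 : (r.toNat = x1.toNat) ↔ r = x1 := pvToNatInj hr hx.1
      have h2 : (c.toNat = x2.toNat) ↔ c = x2 := pvToNatInj hc hx.2
      simp [Prod.ext_iff, h1, h2]
    rw [hdec]
    simp [List.mem_cons, Bool.or_assoc]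

-- the stack loop of B computes, frame by frame, what A's recursion computes on the marked board
theorem mazeGo_eq (board : List (List Bool)) (t_r t_c rows cols : Int) :
    ∀ (n : Nat) (stack : List (Int × Int × String × PySem.Set (Int × Int)))
      (results : List String),
      (stack.map (fun f => 5 ^ potB board f.2.2.2)).sum ≤ n →
      (∀ f ∈ stack, ∀ x ∈ f.2.2.2, 0 ≤ x.1 ∧ 0 ≤ x.2) →
      mazeGo board t_r t_c rows cols stack results
        = results ++ stack.flatMap
            (fun f => maze_li (markB board f.2.2.2) f.1 f.2.1 t_r t_c rows cols f.2.2.1) := by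
  intro n
  induction n with
  | zero =>
    intro stack results hsum hinv
    cases stack with
    | nil => simp [mazeGo]
    | cons f rest =>
      rw [List.map_cons, List.sum_cons] at hsum
      have := pow5_pos (potB board f.2.2.2)
      omega
  | succ n ih =>
    intro stack results hsum hinv
    cases stack with
    | nil => simp [mazeGo]
    | cons f rest =>
      rcases f with ⟨r, c, p, visited⟩
      rw [List.map_cons, List.sum_cons] at hsum
      have hpv := pow5_pos (potB board visited)
      have hsum2 : 5 ^ potB board visited
          + (rest.map (fun f => 5 ^ potB board f.2.2.2)).sum ≤ n + 1 := by
        simpa using hsum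
      have hinvHead : ∀ x ∈ visited, 0 ≤ x.1 ∧ 0 ≤ x.2 :=
        hinv (r, c, p, visited) List.mem_cons_self
      have hinvRest : ∀ f ∈ rest, ∀ x ∈ f.2.2.2, 0 ≤ x.1 ∧ 0 ≤ x.2 :=
        fun f hf => hinv f (List.mem_cons_of_mem _ hf)
      rw [mazeGo]
      by_cases htgt : r = t_r ∧ c = t_c
      · rw [if_pos htgt, ih rest (results ++ [p]) (by omega) hinvRest]
        rw [List.flatMap_cons]
        rw [maze_li]
        rw [if_pos htgt]
        simp
      · rw [if_neg htgt]
        by_cases hrng : ¬(0 ≤ r ∧ r < rows) ∨ ¬(0 ≤ c ∧ c < cols)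
        · rw [dif_pos hrng, ih rest results (by omega) hinvRest]
          rw [List.flatMap_cons]
          rw [maze_li]
          rw [if_neg htgt, if_pos hrng]
          simp
        · rw [dif_neg hrng]
          have hb : (0 ≤ r ∧ r < rows) ∧ (0 ≤ c ∧ c < cols) := by
            rw [not_or, not_not, not_not] at hrng
            exact hrng
          have hmark : cellGet (markB board visited) r c
              = (cellGet board r c || decide ((r, c) ∈ visited)) :=
            cellGet_markB visited board r c hb.1.1 hb.2.1 hinvHead
          by_cases hblk : (cellGet board r c || PySem.Set.contains visited (r, c)) = true
          · rw [dif_pos hblk, ih rest results (by omega) hinvRest]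
            rw [List.flatMap_cons]
            rw [maze_li]
            have hct : cellGet (markB board visited) r c = true := by
              rw [hmark]
              rcases Bool.or_eq_true_iff.mp hblk with h1 | h1
              · rw [h1]
                simp
              · have : (r, c) ∈ visited := by simpa using h1
                simp [this]
            rw [if_neg htgt, if_neg hrng, dif_pos hct]
            simp
          · rw [dif_neg hblk]
            have hor : ¬(cellGet board r c = true ∨ PySem.Set.contains visited (r, c) = true) := by
              simpa using hblk
            have hcell : cellGet board r c = false := by
              cases hcg : cellGet board r c
              · rfl
              · exact absurd (Or.inl hcg) hor
            have hmem : (r, c) ∉ visited := fun hm => hor (Or.inr (by simpa using hm))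
            have hcf : cellGet (markB board visited) r c = false := by
              rw [hmark, hcell]
              simp [hmem]
            have hnv : PySem.Set.add visited (r, c) = visited ++ [(r, c)] :=
              PySem.Set.add_of_not_mem hmem
            have hnvinv : ∀ x ∈ PySem.Set.add visited (r, c), 0 ≤ x.1 ∧ 0 ≤ x.2 := by
              intro x hx
              rw [hnv, List.mem_append] at hx
              rcases hx with hx | hx
              · exact hinvHead x hx
              · rcases List.mem_singleton.mp hx with rfl
                exact ⟨hb.1.1, hb.2.1⟩
            have hpot : potB board (PySem.Set.add visited (r, c)) < potB board visited :=
              potB_add_lt board visited r c hb.1.1 hb.2.1 hcell hmem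
            have hsum' :
                ((((r - 1, c, p ++ "U", PySem.Set.add visited (r, c)) ::
                   (r + 1, c, p ++ "D", PySem.Set.add visited (r, c)) ::
                   (r, c - 1, p ++ "L", PySem.Set.add visited (r, c)) ::
                   (r, c + 1, p ++ "R", PySem.Set.add visited (r, c)) :: rest).map
                   (fun f => 5 ^ potB board f.2.2.2)).sum) ≤ n := by
              simp only [List.map_cons, List.sum_cons]
              have hstep := stepB_lt (potB board (PySem.Set.add visited (r, c)))
                (potB board visited)
                ((rest.map (fun f => 5 ^ potB board f.2.2.2)).sum) hpot
              omega
            have hnvinv' : ∀ f ∈ ((r - 1, c, p ++ "U", PySem.Set.add visited (r, c)) ::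
                   (r + 1, c, p ++ "D", PySem.Set.add visited (r, c)) ::
                   (r, c - 1, p ++ "L", PySem.Set.add visited (r, c)) ::
                   (r, c + 1, p ++ "R", PySem.Set.add visited (r, c)) :: rest),
                ∀ x ∈ f.2.2.2, 0 ≤ x.1 ∧ 0 ≤ x.2 := by
              intro f hf
              simp only [List.mem_cons] at hf
              rcases hf with rfl | rfl | rfl | rfl | hf
              · exact hnvinv
              · exact hnvinv
              · exact hnvinv
              · exact hnvinv
              · exact hinvRest f hf
            have hbd : setCell (markB board visited) r c
                = markB board (PySem.Set.add visited (r, c)) := by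
              rw [hnv, markB_append]
            have hA : maze_li (markB board visited) r c t_r t_c rows cols p
                = maze_li (markB board (PySem.Set.add visited (r, c))) (r - 1) c t_r t_c rows cols (p ++ "U") ++
                  maze_li (markB board (PySem.Set.add visited (r, c))) (r + 1) c t_r t_c rows cols (p ++ "D") ++
                  maze_li (markB board (PySem.Set.add visited (r, c))) r (c - 1) t_r t_c rows cols (p ++ "L") ++
                  maze_li (markB board (PySem.Set.add visited (r, c))) r (c + 1) t_r t_c rows cols (p ++ "R") := by
              rw [maze_li]
              rw [if_neg htgt, if_neg hrng, dif_neg (by rw [hcf]; simp)]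
              rw [hbd]
            rw [ih _ results hsum' hnvinv']
            rw [List.flatMap_cons, List.flatMap_cons, List.flatMap_cons, List.flatMap_cons,
              List.flatMap_cons, hA]
            simp [List.append_assoc]

-- ===== VERDICT (by name: the statement is the Claim_ definition above) =====
theorem maze_li_spec : Claim_equal_maze_li := by
  intro board c_r c_c t_r t_c rows cols path hDom hPre
  unfold Spec_maze_li maze_li_alt
  rw [mazeGo_eq board t_r t_c rows cols
    (([((c_r, c_c, path, PySem.Set.empty) : Int × Int × String × PySem.Set (Int × Int))].map
      (fun f => 5 ^ potB board f.2.2.2)).sum) _ _ le_rfl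
    (by
      intro f hf x hx
      rcases List.mem_singleton.mp hf with rfl
      simp [PySem.Set.empty] at hx)]
  simp [markB]
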